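-- pv_equiv track=rewrite | github.com/rushil1999/Leetcode-solutions | paint-house-ii/paint-house-ii.py | getMinAndSecondMin
-- ===== SOURCE A (Python) =====
-- from typing import List
--
-- def getMinAndSecondMin(arr: List[int]):
--     size = len(arr)
--     minIndex, minIndex2 = 0,0
--
--     val = float('inf')
--     for i in range(size):
--         if(arr[i]  <=val):
--             val = arr[i]
--             minIndex = i
--
--     val2 = float('inf')
--
--     for i in range(size):
--         if(arr[i] <= val2 and arr[i] >= val and minIndex != i):
--             val2 = arr[i]
--             minIndex2 = i
--     return [minIndex, minIndex2]
-- ===== SOURCE B (Python) =====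
-- from typing import List
--
-- def getMinAndSecondMin(arr: List[int]):
--     INF = float('inf')
--     val1 = val2 = INF
--     idx1 = idx2 = 0
--     for i, x in enumerate(arr):
--         if x <= val1:
--             val2, idx2 = val1, idx1
--             val1, idx1 = x, i
--         elif x <= val2:
--             val2, idx2 = x, i
--     return [idx1, idx2]
-- ===== Notes on version B (the rewrite author's own statement) =====
-- stated objective: alternative
-- what changed: Fused A's two sequential passes (find last min index, then rescan for the second-min excluding it) into one linear scan that maintains (val1,idx1) and (val2,idx2) simultaneously, demoting the running minimum to second place when a new <= minimum arrives.
import Mathlib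
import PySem

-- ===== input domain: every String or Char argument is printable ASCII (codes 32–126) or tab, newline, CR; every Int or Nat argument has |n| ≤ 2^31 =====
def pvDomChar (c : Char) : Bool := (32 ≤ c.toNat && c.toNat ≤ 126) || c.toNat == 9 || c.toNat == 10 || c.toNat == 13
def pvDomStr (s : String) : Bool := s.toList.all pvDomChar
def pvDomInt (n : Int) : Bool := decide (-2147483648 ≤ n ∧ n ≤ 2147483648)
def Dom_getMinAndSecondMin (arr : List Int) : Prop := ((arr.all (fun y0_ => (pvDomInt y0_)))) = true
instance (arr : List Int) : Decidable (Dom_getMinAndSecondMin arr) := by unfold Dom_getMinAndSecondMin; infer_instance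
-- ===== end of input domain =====

-- B fuses A's two passes over the array into a single scan keeping (min, its last index)
-- and (second-min excluding that index, its last index) at once; same O(n) cost, one pass.

-- ===== PORT A =====
-- A-side helper: body of A's first loop ('if arr[i] <= val: val, minIndex = arr[i], i');
-- val = none encodes float('inf').
def stepA1 (st : Option Int × Int) (i x : Int) : Option Int × Int :=
  if (match st.1 with | none => true | some v => decide (x ≤ v)) then (some x, i) else st

-- A-side helper: body of A's second loop
-- ('if arr[i] <= val2 and arr[i] >= val and minIndex != i: val2, minIndex2 = arr[i], i').
def stepA2 (val : Option Int) (minIndex : Int) (st : Option Int × Int) (i x : Int) :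
    Option Int × Int :=
  if ((match st.1 with | none => true | some v2 => decide (x ≤ v2)) &&
      (match val with | none => false | some v => decide (v ≤ x)) &&
      (minIndex != i)) then (some x, i) else st

def getMinAndSecondMin (arr : List Int) : List Int :=
  let size : Int := (arr.length : Int)
  let p1 := (PySem.List.pyRange 0 size 1).foldl
      (fun st i => stepA1 st i (PySem.List.pyGetD arr i 0)) (none, 0)
  let p2 := (PySem.List.pyRange 0 size 1).foldl
      (fun st i => stepA2 p1.1 p1.2 st i (PySem.List.pyGetD arr i 0)) (none, 0)
  [p1.2, p2.2]

-- ===== PORT B =====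
-- B-side helper: body of B's single loop; none encodes float('inf').
def stepB (st : (Option Int × Int) × (Option Int × Int)) (i x : Int) :
    (Option Int × Int) × (Option Int × Int) :=
  match st.1.1 with
  | none => ((some x, i), st.1)                    -- x <= val1 (= inf): demote, take first place
  | some a =>
    if x ≤ a then ((some x, i), st.1)              -- x <= val1: demote, take first place
    else match st.2.1 with
      | none => (st.1, (some x, i))                -- elif x <= val2 (= inf)
      | some b => if x ≤ b then (st.1, (some x, i)) else st

def getMinAndSecondMin_alt (arr : List Int) : List Int :=
  let st := (PySem.List.enumerate arr 0).foldl (fun st p => stepB st p.1 p.2)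
      ((none, 0), (none, 0))
  [st.1.2, st.2.2]

-- ===== PRECONDITION & SPEC =====
def Spec_getMinAndSecondMin (arr : List Int) (out : List Int) : Prop := out = getMinAndSecondMin_alt arr
instance (arr : List Int) (out : List Int) : Decidable (Spec_getMinAndSecondMin arr out) := by unfold Spec_getMinAndSecondMin; infer_instance

-- ===== CLAIM (what is proved, stated in full; the proofs are below) =====
def Claim_equal_getMinAndSecondMin : Prop := ∀ (arr : List Int), Dom_getMinAndSecondMin arr → Spec_getMinAndSecondMin arr (getMinAndSecondMin arr)

-- ===== LEMMAS AND PROOFS =====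

-- Shorthand for "pass-1 fold over the enumeration of p starting at s from state st".
def f1 (p : List Int) (s : Int) (st : Option Int × Int) : Option Int × Int :=
  (PySem.List.enumerate p s).foldl (fun st q => stepA1 st q.1 q.2) st

def f2 (val : Option Int) (mi : Int) (p : List Int) (s : Int) (st : Option Int × Int) :
    Option Int × Int :=
  (PySem.List.enumerate p s).foldl (fun st q => stepA2 val mi st q.1 q.2) st

def fB (p : List Int) (s : Int) (st : (Option Int × Int) × (Option Int × Int)) :
    (Option Int × Int) × (Option Int × Int) :=
  (PySem.List.enumerate p s).foldl (fun st q => stepB st q.1 q.2) st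

lemma f1_nil (s : Int) (st : Option Int × Int) : f1 [] s st = st := by
  simp [f1, PySem.List.enumerate_nil]

lemma f1_cons (x : Int) (p : List Int) (s : Int) (st : Option Int × Int) :
    f1 (x :: p) s st = f1 p (s + 1) (stepA1 st s x) := by
  simp [f1, PySem.List.enumerate_cons]

lemma f1_append (p : List Int) (x : Int) (s : Int) (st : Option Int × Int) :
    f1 (p ++ [x]) s st = stepA1 (f1 p s st) (s + p.length) x := by
  simp [f1, PySem.List.enumerate_append, PySem.List.enumerate_cons, PySem.List.enumerate_nil]

lemma f2_append (val : Option Int) (mi : Int) (p : List Int) (x : Int) (s : Int)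
    (st : Option Int × Int) :
    f2 val mi (p ++ [x]) s st = stepA2 val mi (f2 val mi p s st) (s + p.length) x := by
  simp [f2, PySem.List.enumerate_append, PySem.List.enumerate_cons, PySem.List.enumerate_nil]

lemma fB_append (p : List Int) (x : Int) (s : Int) (st : (Option Int × Int) × (Option Int × Int)) :
    fB (p ++ [x]) s st = stepB (fB p s st) (s + p.length) x := by
  simp [fB, PySem.List.enumerate_append, PySem.List.enumerate_cons, PySem.List.enumerate_nil]

-- Pass 1 started in a 'some' state ends in a 'some' state whose value bounds the initial
-- value and every scanned element, and whose index is the initial one or a scanned one.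
lemma f1_some (p : List Int) : ∀ (s v0 i0 : Int), ∃ v i,
    f1 p s (some v0, i0) = (some v, i) ∧ v ≤ v0 ∧ (∀ y ∈ p, v ≤ y) ∧
    (i = i0 ∨ (s ≤ i ∧ i < s + p.length)) := by
  induction p with
  | nil => intro s v0 i0; exact ⟨v0, i0, by simp [f1_nil], le_refl _, by simp, Or.inl rfl⟩
  | cons y t ih =>
    intro s v0 i0
    rw [f1_cons]
    by_cases h : y ≤ v0
    · have hs : stepA1 (some v0, i0) s y = (some y, s) := by simp [stepA1, h]
      rw [hs]
      obtain ⟨v, i, heq, hv0, hall, hi⟩ := ih (s + 1) y s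
      refine ⟨v, i, heq, le_trans hv0 h, ?_, ?_⟩
      · intro z hz
        rcases List.mem_cons.mp hz with rfl | hz
        · exact hv0
        · exact hall z hz
      · rcases hi with rfl | ⟨h1, h2⟩
        · exact Or.inr ⟨le_refl _, by push_cast [List.length_cons]; omega⟩
        · exact Or.inr ⟨by omega, by push_cast [List.length_cons]; omega⟩
    · have hs : stepA1 (some v0, i0) s y = (some v0, i0) := by simp [stepA1, h]
      rw [hs]
      obtain ⟨v, i, heq, hv0, hall, hi⟩ := ih (s + 1) v0 i0
      refine ⟨v, i, heq, hv0, ?_, ?_⟩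
      · intro z hz
        rcases List.mem_cons.mp hz with rfl | hz
        · omega
        · exact hall z hz
      · rcases hi with rfl | ⟨h1, h2⟩
        · exact Or.inl rfl
        · exact Or.inr ⟨by omega, by push_cast [List.length_cons]; omega⟩

-- Shape of pass 1 from the initial state on a nonempty list.
lemma f1_shape (p : List Int) (hp : p ≠ []) (s : Int) : ∃ v i,
    f1 p s (none, 0) = (some v, i) ∧ (∀ y ∈ p, v ≤ y) ∧ s ≤ i ∧ i < s + p.length := by
  obtain ⟨y, t, rfl⟩ := List.exists_cons_of_ne_nil hp
  rw [f1_cons]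
  have hs : stepA1 ((none : Option Int), 0) s y = (some y, s) := by simp [stepA1]
  rw [hs]
  obtain ⟨v, i, heq, hv0, hall, hi⟩ := f1_some t (s + 1) y s
  refine ⟨v, i, heq, ?_, ?_, ?_⟩
  · intro z hz
    rcases List.mem_cons.mp hz with rfl | hz
    · exact hv0
    · exact hall z hz
  · rcases hi with rfl | ⟨h1, _⟩ <;> omega
  · rcases hi with rfl | ⟨_, h2⟩
    · push_cast [List.length_cons]; omega
    · push_cast [List.length_cons] at h2 ⊢; omega

-- When the threshold x is ≤ every scanned element and the excluded index n lies beyond the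
-- scanned range, A's pass-2 body acts exactly like its pass-1 body.
lemma f2_eq_f1 (x : Int) (p : List Int) : ∀ (s n : Int) (st : Option Int × Int),
    (∀ y ∈ p, x ≤ y) → s + p.length ≤ n →
    f2 (some x) n p s st = f1 p s st := by
  induction p with
  | nil => intro s n st _ _; simp [f2, f1, PySem.List.enumerate_nil]
  | cons y t ih =>
    intro s n st hall hn
    have hxy : x ≤ y := hall y (List.mem_cons_self)
    have hsn : s ≠ n := by push_cast [List.length_cons] at hn; omega
    have hstep : stepA2 (some x) n st s y = stepA1 st s y := by
      simp [stepA2, stepA1, hxy, bne_iff_ne, Ne.symm hsn]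
    have h1 : f2 (some x) n (y :: t) s st = f2 (some x) n t (s + 1) (stepA2 (some x) n st s y) := by
      simp [f2, PySem.List.enumerate_cons]
    rw [h1, hstep, f1_cons]
    refine ih (s + 1) n (stepA1 st s y) (fun z hz => hall z (List.mem_cons_of_mem _ hz)) ?_
    push_cast [List.length_cons] at hn ⊢; omega

-- Main invariant: B's one-pass state equals (A's pass-1 result, A's pass-2 result fed with
-- A's pass-1 result), for the whole list scanned from index 0.
lemma fused (p : List Int) :
    fB p 0 ((none, 0), (none, 0)) =
      (f1 p 0 (none, 0),
       f2 (f1 p 0 (none, 0)).1 (f1 p 0 (none, 0)).2 p 0 (none, 0)) := by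
  induction p using List.reverseRecOn with
  | nil => simp [fB, f1, f2, PySem.List.enumerate_nil]
  | append_singleton p x ih =>
    set n : Int := (p.length : Int) with hn
    rw [fB_append, ih]
    by_cases hp : p = []
    · subst hp
      simp [fB, f1, f2, PySem.List.enumerate_nil, PySem.List.enumerate_cons,
        stepA1, stepA2, stepB]
    · obtain ⟨v, i1, hf1, hall, hi0, hilt⟩ := f1_shape p hp 0
      have hi1n : i1 < n := by simpa [hn] using hilt
      have hf1' : f1 (p ++ [x]) 0 (none, 0) = stepA1 (some v, i1) n x := by
        rw [f1_append, hf1]; norm_num [hn]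
      by_cases hxv : x ≤ v
      · -- new (or tying) minimum: B demotes; A's pass 2 with the new threshold
        -- recomputes exactly pass 1 on the prefix.
        have hA1 : f1 (p ++ [x]) 0 (none, 0) = (some x, n) := by
          rw [hf1']; simp [stepA1, hxv]
        have hall' : ∀ y ∈ p, x ≤ y := fun y hy => le_trans hxv (hall y hy)
        have hA2 : f2 (some x) n (p ++ [x]) 0 (none, 0) = (some v, i1) := by
          rw [f2_append]
          have hpre : f2 (some x) n p 0 (none, 0) = (some v, i1) := by
            rw [f2_eq_f1 x p 0 n _ hall' (by simp [hn]), hf1]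
          rw [hpre]
          simp [stepA2, hn]
        rw [hA1, hA2, hf1]
        simp only [stepB]
        simp [hxv]
        exact hn.symm
      · -- minimum unchanged: both sides extend pass 2 / the second slot the same way.
        have hA1 : f1 (p ++ [x]) 0 (none, 0) = (some v, i1) := by
          rw [hf1']; simp [stepA1, hxv]
        have hvx : v ≤ x := le_of_not_ge hxv
        rw [hA1, hf1, f2_append]
        cases hst : (f2 (some v) i1 p 0 (none, 0)).1 with
        | none => simp [stepA2, stepB, hvx, hxv, hst, Prod.ext_iff]; omega
        | some b =>
          by_cases hxb : x ≤ b <;>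
            simp [stepA2, stepB, hvx, hxv, hst, hxb, Prod.ext_iff] <;> omega

-- Bridge: A's range-with-indexing folds are folds over the enumeration.
lemma foldA_bridge {β : Type} (arr : List Int) (g : β → Int → Int → β) (init : β) :
    (PySem.List.pyRange 0 (arr.length : Int) 1).foldl
        (fun st i => g st i (PySem.List.pyGetD arr i 0)) init =
      (PySem.List.enumerate arr 0).foldl (fun st q => g st q.1 q.2) init := by
  rw [PySem.List.enumerate_eq_map_pyRange (d := 0), List.foldl_map]
  simp

-- ===== VERDICT (by name: the statement is the Claim_ definition above) =====
theorem getMinAndSecondMin_spec : Claim_equal_getMinAndSecondMin := by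
  intro arr _
  unfold Spec_getMinAndSecondMin
  simp only [getMinAndSecondMin, getMinAndSecondMin_alt]
  rw [foldA_bridge arr stepA1, foldA_bridge arr (stepA2 _ _)]
  have h := fused arr
  simp only [f1, f2, fB] at h
  rw [h]
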